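-- pv_equiv track=rewrite | github.com/mibi88/mibimarket | main.py | dtext
-- ===== SOURCE A (Python) =====
-- LIMIT = 1000
--
-- def dtext(text, start):
--     # Get how many lines I can send
--     n = 0
--     for c in text[start:start+LIMIT]:
--         if c == '\n': n += 1
--     # Get how many lines I will skip
--     s = 0
--     for c in text[:start]:
--         if c == '\n': s += 1
--     # The part of text that I will show.
--     ntext = ""
--     for i in text.split('\n')[s:s+n]:
--         ntext += i+'\n'
--     return ntext, len(ntext)
-- ===== SOURCE B (Python) =====
-- LIMIT = 1000
--
-- def dtext(text, start):
--     # Locate the shown region by newline offsets and take a single slice,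
--     # instead of splitting the whole text into lines and rejoining a slice.
--     window = text[start:start+LIMIT]
--     last = window.rfind('\n')
--     if last == -1:
--         return "", 0
--     pre = text[:start]
--     begin = pre.rfind('\n') + 1
--     end = len(pre) + last + 1
--     ntext = text[begin:end]
--     return ntext, len(ntext)
-- ===== Notes on version B (the rewrite author's own statement) =====
-- stated objective: alternative
-- what changed: B locates the displayed region by newline offsets (rfind on the byte-window and on the prefix) and returns a single slice of the text, instead of splitting the whole text into a list of lines and concatenating a slice of that list.
import Mathlib
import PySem

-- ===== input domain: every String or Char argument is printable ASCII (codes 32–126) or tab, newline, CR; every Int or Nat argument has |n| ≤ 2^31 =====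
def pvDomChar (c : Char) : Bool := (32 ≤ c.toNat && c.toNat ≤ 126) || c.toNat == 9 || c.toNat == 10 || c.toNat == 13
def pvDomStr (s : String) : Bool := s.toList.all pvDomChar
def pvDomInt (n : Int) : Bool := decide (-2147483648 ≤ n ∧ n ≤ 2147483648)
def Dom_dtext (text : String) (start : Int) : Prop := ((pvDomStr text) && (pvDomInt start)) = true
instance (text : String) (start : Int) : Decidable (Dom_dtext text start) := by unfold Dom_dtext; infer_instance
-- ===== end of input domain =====

-- B locates the shown region by newline offsets (rfind) and takes one slice of the text,
-- instead of splitting the whole text into a list of lines and rejoining a slice of it (alternative).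

def pvLIMIT : Int := 1000

-- ===== PORT A =====
-- literal port over text.toList (Python str iteration/slicing = List Char via PySem.Chars)
def dtext (text : String) (start : Int) : String × Int :=
  let cs := text.toList
  -- n = 0; for c in text[start:start+LIMIT]: if c == '\n': n += 1
  let n : Int := (PySem.Chars.slice cs (some start) (some (start + pvLIMIT))).foldl
      (fun acc c => if c == '\n' then acc + 1 else acc) 0
  -- s = 0; for c in text[:start]: if c == '\n': s += 1
  let s : Int := (PySem.Chars.slice cs none (some start)).foldl
      (fun acc c => if c == '\n' then acc + 1 else acc) 0
  -- ntext = ""; for i in text.split('\n')[s:s+n]: ntext += i + '\n'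
  let lines := PySem.Chars.splitOn cs ['\n']
  let ntext := (PySem.List.slice lines (some s) (some (s + n))).foldl
      (fun acc i => acc ++ i ++ ['\n']) []
  (String.ofList ntext, (ntext.length : Int))

-- ===== PORT B =====
def dtext_alt (text : String) (start : Int) : String × Int :=
  let cs := text.toList
  let window := PySem.Chars.slice cs (some start) (some (start + pvLIMIT))
  let last := PySem.Chars.rfind window ['\n']
  if last == -1 then ("", 0)
  else
    let pre := PySem.Chars.slice cs none (some start)
    let b0 := PySem.Chars.rfind pre ['\n'] + 1
    let e0 := (pre.length : Int) + last + 1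
    let ntext := PySem.Chars.slice cs (some b0) (some e0)
    (String.ofList ntext, (ntext.length : Int))

-- ===== PRECONDITION & SPEC =====
def Spec_dtext (text : String) (start : Int) (out : String × Int) : Prop := out = dtext_alt text start
instance (text : String) (start : Int) (out : String × Int) : Decidable (Spec_dtext text start out) := by unfold Spec_dtext; infer_instance

-- ===== CLAIM (what is proved, stated in full; the proofs are below) =====
def Claim_equal_dtext : Prop := ∀ (text : String) (start : Int), Dom_dtext text start → Spec_dtext text start (dtext text start)

-- ===== LEMMAS AND PROOFS =====

def splitNl : List Char → List (List Char)
  | [] => [[]]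
  | c :: t => if c = '\n' then [] :: splitNl t else (splitNl t).modifyHead (c :: ·)
def nlEnd : List Char → Nat → Nat
  | _, 0 => 0
  | [], _ + 1 => 0
  | c :: t, k + 1 => 1 + (if c = '\n' then nlEnd t k else nlEnd t (k + 1))
theorem splitNl_ne_nil (l : List Char) : splitNl l ≠ [] := by
  induction l with
  | nil => simp [splitNl]
  | cons c t ih =>
    simp only [splitNl]; split
    · simp
    · cases h : splitNl t with
      | nil => exact absurd h ih
      | cons a b => simp [List.modifyHead]
theorem nlEnd_le (l : List Char) : ∀ k, nlEnd l k ≤ l.length := by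
  induction l with
  | nil => intro k; cases k <;> simp [nlEnd]
  | cons c t ih =>
    intro k
    cases k with
    | zero => simp [nlEnd]
    | succ k =>
      have h1 := ih k; have h2 := ih (k+1)
      simp only [nlEnd, List.length_cons]
      split <;> omega

theorem flatJoin_take (l : List Char) : ∀ (k : Nat), k ≤ l.count '\n' →
    ((splitNl l).take k).flatMap (fun i => i ++ ['\n']) = l.take (nlEnd l k) := by
  induction l with
  | nil =>
    intro k hk
    have : k = 0 := by simpa using hk
    subst this; simp [splitNl, nlEnd]
  | cons c t ih =>
    intro k hk
    cases k with
    | zero => simp [nlEnd]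
    | succ k =>
      by_cases hc : c = '\n'
      · subst hc
        have hk' : k ≤ t.count '\n' := by simp at hk; omega
        simp only [splitNl, nlEnd, if_true, List.take_succ_cons, List.flatMap_cons]
        rw [ih k hk', Nat.add_comm 1, List.take_succ_cons]
        simp
      · have hk' : k + 1 ≤ t.count '\n' := by simp [hc] at hk; omega
        simp only [splitNl, if_neg hc, nlEnd]
        cases hs : splitNl t with
        | nil => exact absurd hs (splitNl_ne_nil t)
        | cons a b =>
          have hIH := ih (k+1) hk'
          rw [hs] at hIH
          simp only [List.take_succ_cons, List.flatMap_cons] at hIH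
          simp only [List.modifyHead, List.take_succ_cons, List.flatMap_cons]
          rw [Nat.add_comm 1, List.take_succ_cons, ← hIH]
          simp

theorem flatJoin_segment (l : List Char) (s n : Nat) (h : s + n ≤ l.count '\n') :
    (((splitNl l).drop s).take n).flatMap (fun i => i ++ ['\n'])
      = (l.take (nlEnd l (s + n))).drop (nlEnd l s) := by
  have h1 := flatJoin_take l s (by omega)
  have h2 := flatJoin_take l (s + n) h
  rw [List.take_add, List.flatMap_append, h1] at h2
  have hlen : (l.take (nlEnd l s)).length = nlEnd l s := by
    have := nlEnd_le l s; simp [List.length_take]; omega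
  calc (((splitNl l).drop s).take n).flatMap (fun i => i ++ ['\n'])
      = ((l.take (nlEnd l s)) ++ (((splitNl l).drop s).take n).flatMap (fun i => i ++ ['\n'])).drop (nlEnd l s) := by
        rw [List.drop_left' hlen]
    _ = (l.take (nlEnd l (s + n))).drop (nlEnd l s) := by rw [← h2]

theorem nlEnd_append_nl (p q : List Char) :
    nlEnd (p ++ '\n' :: q) (p.count '\n' + 1) = p.length + 1 := by
  induction p with
  | nil => simp [nlEnd]
  | cons c p ih =>
    by_cases hc : c = '\n'
    · subst hc
      simp only [List.cons_append, List.count_cons, beq_self_eq_true, if_true,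
        nlEnd, ih, List.length_cons]
      omega
    · have hcnt : (c :: p).count '\n' = p.count '\n' := by simp [hc]
      rw [hcnt, List.cons_append]
      show 1 + (if c = '\n' then _ else nlEnd (p ++ '\n' :: q) (p.count '\n' + 1)) = _
      rw [if_neg hc, ih]
      simp; omega

theorem splitOn_go_spec (fuel : Nat) : ∀ (l cur : List Char) (acc : List (List Char)),
    l.length ≤ fuel →
    PySem.Chars.splitOn.go ['\n'] fuel l cur acc
      = acc.reverse ++ (splitNl l).modifyHead (fun h => cur.reverse ++ h) := by
  induction fuel with
  | zero =>
    intro l cur acc h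
    have : l = [] := by cases l <;> simp_all
    subst this
    simp [PySem.Chars.splitOn.go, splitNl, List.modifyHead]
  | succ fuel ih =>
    intro l cur acc h
    cases l with
    | nil => simp [PySem.Chars.splitOn.go, splitNl, List.modifyHead]
    | cons c rest =>
      rw [PySem.Chars.splitOn.go]
      have hpre : (['\n'].isPrefixOf (c :: rest)) = ('\n' == c) := by
        simp [List.isPrefixOf]
      rw [hpre]
      by_cases hc : c = '\n'
      · subst hc
        rw [if_pos (by simp)]
        rw [ih _ _ _ (by simpa using Nat.le_of_succ_le_succ h)]
        simp only [splitNl, List.modifyHead, List.reverse_cons, List.reverse_nil,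
          List.nil_append, List.append_assoc, List.cons_append]
        cases hs : splitNl rest with
        | nil => exact absurd hs (splitNl_ne_nil rest)
        | cons a b => simp [hs]
      · rw [if_neg (by simp [Ne.symm hc])]
        rw [ih _ _ _ (by simpa using Nat.le_of_succ_le_succ h)]
        simp only [splitNl, if_neg hc]
        cases hs : splitNl rest with
        | nil => exact absurd hs (splitNl_ne_nil rest)
        | cons a b => simp [List.modifyHead]

theorem splitOn_eq (cs : List Char) : PySem.Chars.splitOn cs ['\n'] = splitNl cs := by
  rw [PySem.Chars.splitOn, splitOn_go_spec _ _ _ _ (by omega)]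
  cases hs : splitNl cs with
  | nil => exact absurd hs (splitNl_ne_nil cs)
  | cons a b => simp [List.modifyHead]

theorem rfind_go_not_mem (s : List Char) (hs : '\n' ∉ s) : ∀ (j : Nat),
    PySem.Chars.rfind.go s ['\n'] j = -1 := by
  intro j
  induction j with
  | zero =>
    rw [PySem.Chars.rfind.go]
    rw [if_neg]
    intro hp
    rcases List.IsPrefix.mem (List.mem_singleton_self _) (List.isPrefixOf_iff_prefix.mp hp) with hm
    exact hs hm
  | succ k ih =>
    rw [PySem.Chars.rfind.go]
    rw [if_neg, ih]
    intro hp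
    have hm := List.IsPrefix.mem (List.mem_singleton_self _) (List.isPrefixOf_iff_prefix.mp hp)
    exact hs (List.mem_of_mem_drop hm)

theorem rfind_not_mem (s : List Char) (hs : '\n' ∉ s) : PySem.Chars.rfind s ['\n'] = -1 := by
  rw [PySem.Chars.rfind]; exact rfind_go_not_mem s hs _

theorem rfind_go_last (u v : List Char) (hv : '\n' ∉ v) : ∀ (j : Nat), u.length ≤ j →
    PySem.Chars.rfind.go (u ++ '\n' :: v) ['\n'] j = (u.length : Int) := by
  intro j
  induction j with
  | zero =>
    intro hj
    have hu : u = [] := by cases u <;> simp_all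
    subst hu
    rw [PySem.Chars.rfind.go, if_pos (by simp [List.isPrefixOf])]
    simp
  | succ k ih =>
    intro hj
    rw [PySem.Chars.rfind.go]
    by_cases he : u.length = k + 1
    · rw [if_pos]
      · simp [he]
      · rw [← he, List.drop_left]
        simp [List.isPrefixOf]
    · have hk : u.length ≤ k := by omega
      rw [if_neg, ih hk]
      intro hp
      have hdrop : (u ++ '\n' :: v).drop (k+1) = v.drop (k - u.length) := by
        rw [show k+1 = u.length + ((k - u.length) + 1) by omega]
        rw [List.drop_length_add_append]
        exact List.drop_succ_cons
      rw [hdrop] at hp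
      have hm := List.IsPrefix.mem (List.mem_singleton_self _) (List.isPrefixOf_iff_prefix.mp hp)
      exact hv (List.mem_of_mem_drop hm)

theorem rfind_last (u v : List Char) (hv : '\n' ∉ v) :
    PySem.Chars.rfind (u ++ '\n' :: v) ['\n'] = (u.length : Int) := by
  rw [PySem.Chars.rfind]
  exact rfind_go_last u v hv _ (by simp)

theorem exists_last_decomp (xs : List Char) (h : '\n' ∈ xs) :
    ∃ u v, xs = u ++ '\n' :: v ∧ '\n' ∉ v := by
  induction xs with
  | nil => cases h
  | cons a t ih =>
    by_cases ht : '\n' ∈ t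
    · obtain ⟨u, v, rfl, hv⟩ := ih ht
      exact ⟨a :: u, v, rfl, hv⟩
    · have ha : a = '\n' := by
        rcases List.mem_cons.mp h with h1 | h1
        · exact h1.symm
        · exact absurd h1 ht
      exact ⟨[], t, by simp [ha], ht⟩

theorem main_eq (text : String) (start : Int) : dtext text start = dtext_alt text start := by
  simp only [dtext, dtext_alt, pvLIMIT]
  set cs := text.toList with hcsdef
  have hpre : PySem.Chars.slice cs none (some start)
      = cs.take (PySem.List.clampIdx cs.length start) := by
    simp [PySem.Chars.slice, PySem.List.slice]
  have hwin : PySem.Chars.slice cs (some start) (some (start + 1000))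
      = (cs.drop (PySem.List.clampIdx cs.length start)).take
          (PySem.List.clampIdx cs.length (start + 1000) - PySem.List.clampIdx cs.length start) := by
    simp [PySem.Chars.slice, PySem.List.slice]
  rw [hpre, hwin]
  set e1 := PySem.List.clampIdx cs.length start with he1
  set e2 := PySem.List.clampIdx cs.length (start + 1000) with he2
  set pre := cs.take e1 with hpredef
  set w := (cs.drop e1).take (e2 - e1) with hwdef
  set rest := (cs.drop e1).drop (e2 - e1) with hrest
  have hcs : cs = pre ++ (w ++ rest) := by
    rw [hpredef, hwdef, hrest, List.take_append_drop, List.take_append_drop]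
  have hpre_len : pre.length = e1 := by
    rw [hpredef]; simp [List.length_take]; exact PySem.List.clampIdx_le _ _
  set s_cnt := pre.count '\n' with hscnt
  set n_cnt := w.count '\n' with hncnt
  have hsum : s_cnt + n_cnt ≤ cs.count '\n' := by
    conv_rhs => rw [hcs]
    simp only [List.count_append]
    omega
  rw [PySem.List.foldl_beq_add_one, PySem.List.foldl_beq_add_one]
  simp only [zero_add, ← hscnt, ← hncnt]
  rw [PySem.List.slice_natCast_add, splitOn_eq]
  simp only [List.append_assoc]
  rw [PySem.List.foldl_append_eq_flatMap]
  simp only [List.nil_append]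
  by_cases hn : n_cnt = 0
  · rw [hncnt] at hn
    rw [rfind_not_mem w (List.count_eq_zero.mp hn)]
    simp only [BEq.rfl, if_true]
    rw [← hncnt] at hn
    rw [hn]
    simp
  · have hmem : '\n' ∈ w := by
      rw [hncnt] at hn; exact List.count_pos_iff.mp (Nat.pos_of_ne_zero hn)
    obtain ⟨u2, v2, hw2, hv2⟩ := exists_last_decomp w hmem
    have hrf : PySem.Chars.rfind w ['\n'] = (u2.length : Int) := by
      rw [hw2]; exact rfind_last u2 v2 hv2
    rw [hrf]
    rw [if_neg (by simp)]
    have hv2cnt : v2.count '\n' = 0 := List.count_eq_zero.mpr hv2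
    have hu2cnt : u2.count '\n' = n_cnt - 1 := by
      rw [hncnt, hw2]; simp [List.count_append, hv2cnt]
    have hn1 : 1 ≤ n_cnt := Nat.pos_of_ne_zero hn
    -- begin offset
    have hb0 : PySem.Chars.rfind pre ['\n'] + 1 = ((nlEnd cs s_cnt : Nat) : Int) := by
      by_cases hp : '\n' ∈ pre
      · obtain ⟨u1, v1, hp1, hv1⟩ := exists_last_decomp pre hp
        have : PySem.Chars.rfind pre ['\n'] = (u1.length : Int) := by
          rw [hp1]; exact rfind_last u1 v1 hv1
        rw [this]
        have hs1 : s_cnt = u1.count '\n' + 1 := by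
          rw [hscnt, hp1]; simp [List.count_append, List.count_eq_zero.mpr hv1]
        have hcs2 : cs = u1 ++ '\n' :: (v1 ++ (w ++ rest)) := by
          rw [hcs, hp1]; simp
        rw [hs1, hcs2, nlEnd_append_nl]
        push_cast; ring
      · rw [rfind_not_mem pre hp]
        have : s_cnt = 0 := by rw [hscnt]; exact List.count_eq_zero.mpr hp
        rw [this]
        simp [nlEnd]
    -- end offset
    have he0 : (pre.length : Int) + (u2.length : Int) + 1 = ((nlEnd cs (s_cnt + n_cnt) : Nat) : Int) := by
      have hcs3 : cs = (pre ++ u2) ++ '\n' :: (v2 ++ rest) := by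
        rw [hcs, hw2]; simp
      have hcnt3 : (pre ++ u2).count '\n' + 1 = s_cnt + n_cnt := by
        simp [List.count_append, hu2cnt, ← hscnt]; omega
      rw [hcs3]
      rw [show s_cnt + n_cnt = (pre ++ u2).count '\n' + 1 from hcnt3.symm]
      rw [nlEnd_append_nl]
      push_cast [List.length_append]; ring
    rw [hb0, he0]
    have hsliceB : PySem.Chars.slice cs (some ((nlEnd cs s_cnt : Nat) : Int)) (some ((nlEnd cs (s_cnt + n_cnt) : Nat) : Int))
        = (cs.drop (nlEnd cs s_cnt)).take (nlEnd cs (s_cnt + n_cnt) - nlEnd cs s_cnt) := by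
      show PySem.List.slice _ _ _ = _
      rw [PySem.List.slice_toNat cs (by positivity) (by positivity)]
      simp
    rw [hsliceB]
    rw [flatJoin_segment cs s_cnt n_cnt hsum]
    rw [List.drop_take]

-- ===== VERDICT (by name: the statement is the Claim_ definition above) =====
theorem dtext_spec : Claim_equal_dtext := by
  intro text start _
  simpa [Spec_dtext] using main_eq text start
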